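-- pv_equiv track=rewrite | github.com/GameHoo/CirclesExperiment | data_process.py | unget_diff
-- ===== SOURCE A (Python) =====
-- def unget_diff(first_items, sequences):
--     """
--     与 get_rise 做相反的操作
--     :param first_items: list, sequences 里 每个 sequence 的第一个数据 的列表
--     :param sequences: list, 转化为波动率之后的 sequences
--     :return:
--     """
--     new_sequences = []
--     for i, sequence in enumerate(sequences):
--         new_sequence = []
--         new_sequence.append(first_items[i])
--         last_item = first_items[i]
--         for j in range(len(sequence)):
--             cur_rise = sequence[j]
--             cur_item = [0, 0]
--             cur_item[0] = cur_rise[0] + last_item[0]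
--             cur_item[1] = cur_rise[1] + last_item[1]
--             new_sequence.append(cur_item)
--             last_item = cur_item
--         new_sequences.append(new_sequence)
--     return new_sequences
-- ===== SOURCE B (Python) =====
-- def _prefix(start, ds):
--     acc = start
--     out = []
--     for d in ds:
--         acc += d
--         out.append(acc)
--     return out
--
--
-- def unget_diff(first_items, sequences):
--     new_sequences = []
--     for first, seq in zip(first_items, sequences):
--         if not seq:
--             new_sequences.append([first])
--             continue
--         ch0 = _prefix(first[0], [d[0] for d in seq])
--         ch1 = _prefix(first[1], [d[1] for d in seq])
--         new_sequences.append([first] + [[x, y] for x, y in zip(ch0, ch1)])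
--     return new_sequences
-- ===== Notes on version B (the rewrite author's own statement) =====
-- stated objective: alternative
-- what changed: Replaces the index-driven nested loops carrying a last_item 2-vector with a zip over (first, sequence) pairs that transposes each sequence into two coordinate channels, runs an independent running prefix sum per channel, and zips the channels back into fresh [x, y] lists.
import Mathlib
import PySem

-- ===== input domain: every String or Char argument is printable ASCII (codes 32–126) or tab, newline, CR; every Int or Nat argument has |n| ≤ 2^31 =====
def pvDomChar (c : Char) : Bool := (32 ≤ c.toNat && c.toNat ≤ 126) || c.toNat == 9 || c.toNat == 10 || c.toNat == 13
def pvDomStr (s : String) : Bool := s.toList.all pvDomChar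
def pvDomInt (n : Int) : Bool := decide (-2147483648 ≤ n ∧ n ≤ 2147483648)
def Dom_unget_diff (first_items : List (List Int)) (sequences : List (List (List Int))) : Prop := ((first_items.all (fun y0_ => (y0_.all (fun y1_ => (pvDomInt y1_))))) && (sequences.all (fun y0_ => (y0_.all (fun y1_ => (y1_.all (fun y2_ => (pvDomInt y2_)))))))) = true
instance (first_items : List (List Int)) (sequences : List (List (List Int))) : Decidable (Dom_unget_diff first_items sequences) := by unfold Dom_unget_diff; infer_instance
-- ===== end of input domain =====

-- B replaces the index-driven nested loops with a zip over (first, sequence) pairs,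
-- a per-coordinate running prefix sum on the transposed channels, and zipping back;
-- objective: alternative decomposition, same cost.

-- ===== PORT A =====
def unget_diff (first_items : List (List Int)) (sequences : List (List (List Int))) : List (List (List Int)) :=
  (PySem.List.enumerate sequences).foldl (fun new_sequences iseq =>
    let i := iseq.1
    let sequence := iseq.2
    let fi := PySem.List.pyGetD first_items i []
    let st := (PySem.List.pyRange 0 (sequence.length : Int) 1).foldl
      (fun (st : List (List Int) × List Int) j =>
        let cur_rise := PySem.List.pyGetD sequence j []
        let last_item := st.2
        let cur_item : List Int :=
          [PySem.List.pyGetD cur_rise 0 0 + PySem.List.pyGetD last_item 0 0,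
           PySem.List.pyGetD cur_rise 1 0 + PySem.List.pyGetD last_item 1 0]
        (st.1 ++ [cur_item], cur_item))
      ([fi], fi)
    new_sequences ++ [st.1]) []

-- ===== PORT B =====
-- running prefix sum of one coordinate channel (port of _prefix in Source B)
def pvPrefix (start : Int) (ds : List Int) : List Int :=
  (ds.foldl (fun (st : Int × List Int) d => (st.1 + d, st.2 ++ [st.1 + d])) (start, ([] : List Int))).2

def unget_diff_alt (first_items : List (List Int)) (sequences : List (List (List Int))) : List (List (List Int)) :=
  (first_items.zip sequences).map (fun fs =>
    let first := fs.1
    let seq := fs.2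
    if seq.isEmpty then [first]
    else
      let ch0 := pvPrefix (PySem.List.pyGetD first 0 0) (seq.map (fun d => PySem.List.pyGetD d 0 0))
      let ch1 := pvPrefix (PySem.List.pyGetD first 1 0) (seq.map (fun d => PySem.List.pyGetD d 1 0))
      first :: (ch0.zip ch1).map (fun xy => [xy.1, xy.2]))

-- ===== PRECONDITION & SPEC =====
-- Pre_ excludes exactly the inputs where Python A raises IndexError: sequences longer than
-- first_items, a diff row of length < 2, or a first item of length < 2 paired with a
-- non-empty sequence.
def Pre_unget_diff (first_items : List (List Int)) (sequences : List (List (List Int))) : Prop :=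
  sequences.length ≤ first_items.length ∧
  ∀ p ∈ first_items.zip sequences,
    (p.2 ≠ [] → 2 ≤ p.1.length) ∧ ∀ row ∈ p.2, 2 ≤ row.length
instance (first_items : List (List Int)) (sequences : List (List (List Int))) : Decidable (Pre_unget_diff first_items sequences) := by unfold Pre_unget_diff; infer_instance

def pvWitness_unget_diff : List (List Int) × List (List (List Int)) :=
  ([[1, 2], [5, 6]], [[[3, 4]], []])

def Spec_unget_diff (first_items : List (List Int)) (sequences : List (List (List Int))) (out : List (List (List Int))) : Prop := out = unget_diff_alt first_items sequences
instance (first_items : List (List Int)) (sequences : List (List (List Int))) (out : List (List (List Int))) : Decidable (Spec_unget_diff first_items sequences out) := by unfold Spec_unget_diff; infer_instance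

-- ===== CLAIM (what is proved, stated in full; the proofs are below) =====
def Claim_equal_unget_diff : Prop := ∀ (first_items : List (List Int)) (sequences : List (List (List Int))), Dom_unget_diff first_items sequences → Pre_unget_diff first_items sequences → Spec_unget_diff first_items sequences (unget_diff first_items sequences)


-- ===== LEMMAS AND PROOFS =====

-- pvPrefix: the accumulated output list just prepends
theorem pvPrefix_aux (ds : List Int) : ∀ (a : Int) (acc : List Int),
    (ds.foldl (fun (st : Int × List Int) d => (st.1 + d, st.2 ++ [st.1 + d])) (a, acc)).2
      = acc ++ pvPrefix a ds := by
  induction ds with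
  | nil => intro a acc; simp [pvPrefix]
  | cons d ds ih =>
    intro a acc
    simp only [List.foldl_cons]
    rw [ih]
    conv_rhs => rw [pvPrefix, List.foldl_cons, ih]
    simp

theorem pvPrefix_cons (a d : Int) (ds : List Int) :
    pvPrefix a (d :: ds) = (a + d) :: pvPrefix (a + d) ds := by
  conv_lhs => rw [pvPrefix, List.foldl_cons, pvPrefix_aux]
  simp

theorem pyGetD_pair_one (x y : Int) : PySem.List.pyGetD [x, y] 1 0 = y := by
  have : ((1 : Nat) : Int) = (1 : Int) := by norm_num
  rw [← this, PySem.List.pyGetD_natCast]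
  rfl

-- inner loop of A = zipped per-channel prefix sums
theorem inner_eq (seq : List (List Int)) : ∀ (acc : List (List Int)) (last : List Int),
    (seq.foldl
      (fun (st : List (List Int) × List Int) cur_rise =>
        let cur_item : List Int :=
          [PySem.List.pyGetD cur_rise 0 0 + PySem.List.pyGetD st.2 0 0,
           PySem.List.pyGetD cur_rise 1 0 + PySem.List.pyGetD st.2 1 0]
        (st.1 ++ [cur_item], cur_item)) (acc, last)).1
    = acc ++ ((pvPrefix (PySem.List.pyGetD last 0 0) (seq.map (fun d => PySem.List.pyGetD d 0 0))).zip
              (pvPrefix (PySem.List.pyGetD last 1 0) (seq.map (fun d => PySem.List.pyGetD d 1 0)))).map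
              (fun xy => [xy.1, xy.2]) := by
  induction seq with
  | nil => intro acc last; simp [pvPrefix]
  | cons r seq ih =>
    intro acc last
    simp only [List.foldl_cons, List.map_cons]
    rw [ih, pvPrefix_cons, pvPrefix_cons]
    simp [pyGetD_pair_one, List.zip_cons_cons, Int.add_comm]

theorem outer_eq (seqs : List (List (List Int))) : ∀ (pre rest : List (List Int))
    (acc : List (List (List Int))), seqs.length ≤ rest.length →
    (PySem.List.enumerate seqs (pre.length : Int)).foldl
      (fun new_sequences (iseq : Int × List (List Int)) =>
        let fi := PySem.List.pyGetD (pre ++ rest) iseq.1 []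
        let st := (PySem.List.pyRange 0 (iseq.2.length : Int) 1).foldl
          (fun (st : List (List Int) × List Int) j =>
            let cur_rise := PySem.List.pyGetD iseq.2 j []
            let cur_item : List Int :=
              [PySem.List.pyGetD cur_rise 0 0 + PySem.List.pyGetD st.2 0 0,
               PySem.List.pyGetD cur_rise 1 0 + PySem.List.pyGetD st.2 1 0]
            (st.1 ++ [cur_item], cur_item)) ([fi], fi)
        new_sequences ++ [st.1]) acc
    = acc ++ (rest.zip seqs).map (fun fs =>
        if fs.2.isEmpty then [fs.1]
        else fs.1 :: ((pvPrefix (PySem.List.pyGetD fs.1 0 0) (fs.2.map (fun d => PySem.List.pyGetD d 0 0))).zip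
                      (pvPrefix (PySem.List.pyGetD fs.1 1 0) (fs.2.map (fun d => PySem.List.pyGetD d 1 0)))).map
                      (fun xy => [xy.1, xy.2])) := by
  induction seqs with
  | nil => intro pre rest acc h; simp [PySem.List.enumerate]
  | cons s seqs ih =>
    intro pre rest acc h
    cases rest with
    | nil => simp at h
    | cons r rest' =>
      rw [PySem.List.enumerate_cons, List.foldl_cons]
      have hfi : PySem.List.pyGetD (pre ++ r :: rest') ((pre.length : Nat) : Int) [] = r := by
        simp [PySem.List.pyGetD_natCast, List.getD_eq_getElem?_getD]
      simp only [hfi]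
      rw [PySem.List.foldl_pyRange_zero_pyGetD' s ([] : List Int)
        (fun (st : List (List Int) × List Int) cur_rise =>
          (st.1 ++ [[PySem.List.pyGetD cur_rise 0 0 + PySem.List.pyGetD st.2 0 0,
                     PySem.List.pyGetD cur_rise 1 0 + PySem.List.pyGetD st.2 1 0]],
           [PySem.List.pyGetD cur_rise 0 0 + PySem.List.pyGetD st.2 0 0,
            PySem.List.pyGetD cur_rise 1 0 + PySem.List.pyGetD st.2 1 0])) ([r], r)]
      have hin := inner_eq s [r] r
      have hpre : pre ++ r :: rest' = (pre ++ [r]) ++ rest' := by simp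
      have hlen : ((pre.length : Int) + 1) = (((pre ++ [r]).length : Nat) : Int) := by
        simp
      rw [hpre, hlen, ih (pre ++ [r]) rest' _ (by simpa using h)]
      rw [hin]
      cases s with
      | nil => simp [pvPrefix]
      | cons d ds => simp

-- ===== VERDICT (by name: the statement is the Claim_ definition above) =====
theorem unget_diff_spec : Claim_equal_unget_diff := by
  intro first_items sequences _ hpre
  unfold Spec_unget_diff unget_diff unget_diff_alt
  have h := outer_eq sequences [] first_items [] hpre.1
  simp only [List.nil_append, List.length_nil, Nat.cast_zero] at h ⊢
  rw [h]
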